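-- pv_equiv track=rewrite | github.com/ThePedrock/tetris | python/tetris.py | translateArray
-- ===== SOURCE A (Python) =====
-- def translateArray(sourceArray, sourceColumnNumber, destinationArray, destinationColumnNumber, pos, transparency):
--     newArray = destinationArray
--     for index, element in enumerate(sourceArray):
--         #if ((pos % destinationColumnNumber) + (index % sourceColumnNumber)) < destinationColumnNumber:
--         newPos = pos + (index % sourceColumnNumber) + ((index // sourceColumnNumber) * destinationColumnNumber)
--         if newPos < len(newArray):
--             if not transparency:
--                 newArray[newPos] = element
--             else:
--                 if element != 0:
--                     newArray[newPos] = element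
--
--     return newArray
-- ===== SOURCE B (Python) =====
-- def translateArray(sourceArray, sourceColumnNumber, destinationArray, destinationColumnNumber, pos, transparency):
--     # Gather instead of scatter: walk the source BACKWARDS collecting, first-wins,
--     # an overlay {destination index: value} (last write in A's order wins), then
--     # rebuild the destination in one comprehension.
--     # (Unlike A, this does not mutate destinationArray in place.)
--     n = len(destinationArray)
--     overlay = {}
--     for index in range(len(sourceArray) - 1, -1, -1):
--         element = sourceArray[index]
--         if transparency and element == 0:
--             continue
--         row, col = divmod(index, sourceColumnNumber)
--         j = pos + col + row * destinationColumnNumber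
--         if 0 <= j < n and j not in overlay:
--             overlay[j] = element
--     return [overlay.get(j, v) for j, v in enumerate(destinationArray)]
-- ===== Notes on version B (the rewrite author's own statement) =====
-- stated objective: alternative
-- what changed: A scatters: it walks the source forwards and mutates the destination array in place; B gathers: it walks the source backwards building a first-wins overlay dict of destination cells, then rebuilds the destination as a new list in one comprehension (no mutation).
-- intended difference: On inputs where some written cell's destination index pos + col + row*destinationColumnNumber is negative but >= -len(destinationArray), A silently overwrites cells near the END of the array (Python negative-index wraparound); B leaves those cells unchanged, the intended behaviour when pasting a grid at an offset. — e.g. on translateArray([5], 1, [1, 2, 3], 1, -1, false): A returns [1, 2, 5], B returns [1, 2, 3]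
import Mathlib
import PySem

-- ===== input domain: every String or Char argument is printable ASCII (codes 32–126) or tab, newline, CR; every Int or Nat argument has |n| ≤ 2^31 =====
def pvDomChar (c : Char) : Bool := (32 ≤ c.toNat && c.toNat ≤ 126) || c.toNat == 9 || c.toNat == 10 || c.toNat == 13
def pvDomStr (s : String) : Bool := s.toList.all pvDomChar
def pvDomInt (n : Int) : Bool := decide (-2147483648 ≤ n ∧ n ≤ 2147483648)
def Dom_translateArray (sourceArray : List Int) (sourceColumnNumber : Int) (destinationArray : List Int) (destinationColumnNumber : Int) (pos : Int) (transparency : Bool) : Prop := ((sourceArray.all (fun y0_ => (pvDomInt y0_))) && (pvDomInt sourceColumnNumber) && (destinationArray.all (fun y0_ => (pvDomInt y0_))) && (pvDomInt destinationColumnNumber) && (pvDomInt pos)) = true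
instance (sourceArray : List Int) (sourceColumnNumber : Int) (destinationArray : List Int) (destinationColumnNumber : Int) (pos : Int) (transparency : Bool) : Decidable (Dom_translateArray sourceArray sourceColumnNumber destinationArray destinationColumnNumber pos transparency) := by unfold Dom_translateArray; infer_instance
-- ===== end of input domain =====

-- B replaces A's scatter (walk the source forwards, mutating the destination in place) by a
-- gather: walk the source backwards into a first-wins overlay dict of destination cells, then
-- rebuild the destination; equivalence is about the RETURN value only: A mutates
-- destinationArray in place, B does not.

-- ===== PORT A =====
def translateArray (sourceArray : List Int) (sourceColumnNumber : Int) (destinationArray : List Int) (destinationColumnNumber : Int) (pos : Int) (transparency : Bool) : List Int :=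
  (PySem.List.enumerate sourceArray 0).foldl (fun newArray ie =>
    let newPos := pos + PySem.Int.mod ie.1 sourceColumnNumber +
      PySem.Int.floordiv ie.1 sourceColumnNumber * destinationColumnNumber
    if newPos < PySem.List.len newArray then
      if transparency = false then
        PySem.List.pySetD newArray newPos ie.2          -- Python raises when newPos < -len: excluded by Pre_
      else if ie.2 ≠ 0 then
        PySem.List.pySetD newArray newPos ie.2
      else newArray
    else newArray) destinationArray

-- ===== PORT B =====
def translateArray_alt (sourceArray : List Int) (sourceColumnNumber : Int) (destinationArray : List Int) (destinationColumnNumber : Int) (pos : Int) (transparency : Bool) : List Int :=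
  let n := PySem.List.len destinationArray
  let overlay := (PySem.List.pyRange (PySem.List.len sourceArray - 1) (-1) (-1)).foldl
    (fun ov index =>
      let element := PySem.List.pyGetD sourceArray index 0
      if transparency = true ∧ element = 0 then ov
      else
        let j := pos + PySem.Int.mod index sourceColumnNumber +
          PySem.Int.floordiv index sourceColumnNumber * destinationColumnNumber
        if 0 ≤ j ∧ j < n ∧ ov.contains j = false then ov.insert j element else ov)
    (PySem.Dict.empty : PySem.Dict Int Int)
  (PySem.List.enumerate destinationArray 0).map (fun jv => overlay.getD jv.1 jv.2)

-- ===== PRECONDITION & SPEC =====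
-- the destination index A writes source cell k to
def pvNp (sourceColumnNumber : Int) (destinationColumnNumber : Int) (pos : Int) (i : Int) : Int :=
  pos + PySem.Int.mod i sourceColumnNumber + PySem.Int.floordiv i sourceColumnNumber * destinationColumnNumber

-- Pre_ excludes sourceColumnNumber = 0 (ZeroDivisionError) and any written cell landing below
-- -len(destinationArray) (IndexError on list assignment); everywhere else A returns normally.
def Pre_translateArray (sourceArray : List Int) (sourceColumnNumber : Int) (destinationArray : List Int) (destinationColumnNumber : Int) (pos : Int) (transparency : Bool) : Prop :=
  sourceColumnNumber ≠ 0 ∧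
  ∀ k : Nat, k < sourceArray.length →
    (transparency = false ∨ sourceArray.getD k 0 ≠ 0) →
    -(destinationArray.length : Int) ≤ pvNp sourceColumnNumber destinationColumnNumber pos (k : Int)
instance (sourceArray : List Int) (sourceColumnNumber : Int) (destinationArray : List Int) (destinationColumnNumber : Int) (pos : Int) (transparency : Bool) : Decidable (Pre_translateArray sourceArray sourceColumnNumber destinationArray destinationColumnNumber pos transparency) := by unfold Pre_translateArray; infer_instance

def pvWitness_translateArray : List Int × Int × List Int × Int × Int × Bool := ([1], 1, [2], 1, 0, false)

-- On inputs where a written cell's destination index is negative but ≥ -len(destinationArray),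
-- A silently writes near the END of the array (Python negative-index wraparound) while B leaves
-- those cells alone, which is the intended behaviour for copying a grid at an offset.
def D_translateArray (sourceArray : List Int) (sourceColumnNumber : Int) (destinationArray : List Int) (destinationColumnNumber : Int) (pos : Int) (transparency : Bool) : Prop :=
  ∃ k : Nat, k < sourceArray.length ∧
    (transparency = false ∨ sourceArray.getD k 0 ≠ 0) ∧
    -(destinationArray.length : Int) ≤ pvNp sourceColumnNumber destinationColumnNumber pos (k : Int) ∧
    pvNp sourceColumnNumber destinationColumnNumber pos (k : Int) < 0
instance (sourceArray : List Int) (sourceColumnNumber : Int) (destinationArray : List Int) (destinationColumnNumber : Int) (pos : Int) (transparency : Bool) : Decidable (D_translateArray sourceArray sourceColumnNumber destinationArray destinationColumnNumber pos transparency) := by unfold D_translateArray; infer_instance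

def Spec_translateArray (sourceArray : List Int) (sourceColumnNumber : Int) (destinationArray : List Int) (destinationColumnNumber : Int) (pos : Int) (transparency : Bool) (out : List Int) : Prop := ¬ D_translateArray sourceArray sourceColumnNumber destinationArray destinationColumnNumber pos transparency → out = translateArray_alt sourceArray sourceColumnNumber destinationArray destinationColumnNumber pos transparency
instance (sourceArray : List Int) (sourceColumnNumber : Int) (destinationArray : List Int) (destinationColumnNumber : Int) (pos : Int) (transparency : Bool) (out : List Int) : Decidable (Spec_translateArray sourceArray sourceColumnNumber destinationArray destinationColumnNumber pos transparency out) := by unfold Spec_translateArray; infer_instance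

def pvDiffWitness_translateArray : List Int × Int × List Int × Int × Int × Bool := ([5], 1, [1, 2, 3], 1, -1, false)
def pvDiffWitnessOut_translateArray : (List Int) × (List Int) := ([1, 2, 5], [1, 2, 3])

-- ===== CLAIM (what is proved, stated in full; the proofs are below) =====
def Claim_unchanged_translateArray : Prop := ∀ (sourceArray : List Int) (sourceColumnNumber : Int) (destinationArray : List Int) (destinationColumnNumber : Int) (pos : Int) (transparency : Bool), Dom_translateArray sourceArray sourceColumnNumber destinationArray destinationColumnNumber pos transparency → Pre_translateArray sourceArray sourceColumnNumber destinationArray destinationColumnNumber pos transparency → Spec_translateArray sourceArray sourceColumnNumber destinationArray destinationColumnNumber pos transparency (translateArray sourceArray sourceColumnNumber destinationArray destinationColumnNumber pos transparency)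
def Claim_changed_translateArray : Prop := Dom_translateArray (pvDiffWitness_translateArray.1) (pvDiffWitness_translateArray.2.1) (pvDiffWitness_translateArray.2.2.1) (pvDiffWitness_translateArray.2.2.2.1) (pvDiffWitness_translateArray.2.2.2.2.1) (pvDiffWitness_translateArray.2.2.2.2.2) ∧ Pre_translateArray (pvDiffWitness_translateArray.1) (pvDiffWitness_translateArray.2.1) (pvDiffWitness_translateArray.2.2.1) (pvDiffWitness_translateArray.2.2.2.1) (pvDiffWitness_translateArray.2.2.2.2.1) (pvDiffWitness_translateArray.2.2.2.2.2) ∧ D_translateArray (pvDiffWitness_translateArray.1) (pvDiffWitness_translateArray.2.1) (pvDiffWitness_translateArray.2.2.1) (pvDiffWitness_translateArray.2.2.2.1) (pvDiffWitness_translateArray.2.2.2.2.1) (pvDiffWitness_translateArray.2.2.2.2.2) ∧ translateArray (pvDiffWitness_translateArray.1) (pvDiffWitness_translateArray.2.1) (pvDiffWitness_translateArray.2.2.1) (pvDiffWitness_translateArray.2.2.2.1) (pvDiffWitness_translateArray.2.2.2.2.1) (pvDiffWitness_translateArray.2.2.2.2.2) = pvDiffWitnessOut_translateArray.1 ∧ translateArray_alt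 (pvDiffWitness_translateArray.1) (pvDiffWitness_translateArray.2.1) (pvDiffWitness_translateArray.2.2.1) (pvDiffWitness_translateArray.2.2.2.1) (pvDiffWitness_translateArray.2.2.2.2.1) (pvDiffWitness_translateArray.2.2.2.2.2) = pvDiffWitnessOut_translateArray.2 ∧ pvDiffWitnessOut_translateArray.1 ≠ pvDiffWitnessOut_translateArray.2

-- ===== LEMMAS AND PROOFS =====

def pvLatestWrite (sourceArray : List Int) (sourceColumnNumber : Int) (destinationColumnNumber : Int) (pos : Int) (transparency : Bool) (j : Int) (dflt : Int) : Int :=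
  ((PySem.List.pyRange (PySem.List.len sourceArray - 1) (-1) (-1)).foldl (fun acc index =>
    match acc with
    | some e => some e
    | none =>
      let element := PySem.List.pyGetD sourceArray index 0
      if transparency = true ∧ element = 0 then none
      else if pos + PySem.Int.mod index sourceColumnNumber +
            PySem.Int.floordiv index sourceColumnNumber * destinationColumnNumber = j then some element
      else none) none).getD dflt

def pvGather (sourceArray : List Int) (sourceColumnNumber : Int) (destinationArray : List Int) (destinationColumnNumber : Int) (pos : Int) (transparency : Bool) : List Int :=
  (PySem.List.enumerate destinationArray 0).map (fun jv =>
    pvLatestWrite sourceArray sourceColumnNumber destinationColumnNumber pos transparency jv.1 jv.2)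

def pvStepB (src : List Int) (scn dcn pos : Int) (transp : Bool) (j : Int)
    (acc : Option Int) (index : Int) : Option Int :=
  match acc with
  | some e => some e
  | none =>
    let element := PySem.List.pyGetD src index 0
    if transp = true ∧ element = 0 then none
    else if pos + PySem.Int.mod index scn + PySem.Int.floordiv index scn * dcn = j then some element
    else none

theorem pvLW_eq (src : List Int) (scn dcn pos : Int) (transp : Bool) (j d : Int) :
    pvLatestWrite src scn dcn pos transp j d
      = ((PySem.List.pyRange (PySem.List.len src - 1) (-1) (-1)).foldl
          (pvStepB src scn dcn pos transp j) none).getD d := rfl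

theorem pvFold_some (f : Option Int → Int → Option Int) (hf : ∀ e x, f (some e) x = some e)
    (l : List Int) (e : Int) : l.foldl f (some e) = some e := by
  induction l with
  | nil => rfl
  | cons x xs ih => simpa [List.foldl_cons, hf] using ih

theorem pvGetD_append_lt (xs : List Int) (x : Int) (i : Int) (h0 : 0 ≤ i) (hlt : i < (xs.length : Int)) :
    PySem.List.pyGetD (xs ++ [x]) i 0 = PySem.List.pyGetD xs i 0 := by
  obtain ⟨m, rfl⟩ : ∃ m : Nat, i = (m : Int) := ⟨i.toNat, (Int.toNat_of_nonneg h0).symm⟩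
  have hm : m < xs.length := by exact_mod_cast hlt
  simp [PySem.List.pyGetD_natCast, List.getD, hm, List.getElem?_append_left]

theorem pvLW_append (xs : List Int) (x : Int) (scn dcn pos : Int) (transp : Bool) (j d : Int) :
    pvLatestWrite (xs ++ [x]) scn dcn pos transp j d =
      if transp = true ∧ x = 0 then pvLatestWrite xs scn dcn pos transp j d
      else if pos + PySem.Int.mod (xs.length : Int) scn +
          PySem.Int.floordiv (xs.length : Int) scn * dcn = j then x
      else pvLatestWrite xs scn dcn pos transp j d := by
  have hlen : PySem.List.len (xs ++ [x]) - 1 = (xs.length : Int) := by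
    simp [PySem.List.len_eq]
  have hcons : PySem.List.pyRange (PySem.List.len (xs ++ [x]) - 1) (-1) (-1)
      = (xs.length : Int) :: PySem.List.pyRange ((xs.length : Int) - 1) (-1) (-1) := by
    rw [hlen, PySem.List.pyRange_neg_one_cons (by omega)]
  have hgetx : PySem.List.pyGetD (xs ++ [x]) (xs.length : Int) 0 = x := by
    simp [PySem.List.pyGetD_natCast]
  have hcongr : ∀ init : Option Int,
      (PySem.List.pyRange ((xs.length : Int) - 1) (-1) (-1)).foldl
        (pvStepB (xs ++ [x]) scn dcn pos transp j) init
      = (PySem.List.pyRange ((xs.length : Int) - 1) (-1) (-1)).foldl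
        (pvStepB xs scn dcn pos transp j) init := by
    intro init
    apply PySem.List.foldl_congr_mem
    intro acc i hi
    have hb := (PySem.List.mem_pyRange_neg_one).1 hi
    have hget := pvGetD_append_lt xs x i (by omega) (by omega)
    cases acc <;> simp [pvStepB, hget]
  have hlenxs : PySem.List.len xs - 1 = (xs.length : Int) - 1 := by simp [PySem.List.len_eq]
  rw [pvLW_eq, hcons, List.foldl_cons]
  have hstep : pvStepB (xs ++ [x]) scn dcn pos transp j none (xs.length : Int)
      = if transp = true ∧ x = 0 then none
        else if pos + PySem.Int.mod (xs.length : Int) scn +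
            PySem.Int.floordiv (xs.length : Int) scn * dcn = j then some x
        else none := by
    simp [pvStepB, hgetx]
  rw [hstep]
  by_cases h1 : transp = true ∧ x = 0
  · rw [if_pos h1, if_pos h1, hcongr, pvLW_eq, hlenxs]
  · rw [if_neg h1, if_neg h1]
    by_cases h2 : pos + PySem.Int.mod (xs.length : Int) scn +
        PySem.Int.floordiv (xs.length : Int) scn * dcn = j
    · rw [if_pos h2, if_pos h2, pvFold_some _ (fun e y => rfl)]
      rfl
    · rw [if_neg h2, if_neg h2, hcongr, pvLW_eq, hlenxs]

def pvStepA (scn dcn pos : Int) (transp : Bool) (newArray : List Int) (ie : Int × Int) : List Int :=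
  let newPos := pos + PySem.Int.mod ie.1 scn + PySem.Int.floordiv ie.1 scn * dcn
  if newPos < PySem.List.len newArray then
    if transp = false then
      PySem.List.pySetD newArray newPos ie.2
    else if ie.2 ≠ 0 then
      PySem.List.pySetD newArray newPos ie.2
    else newArray
  else newArray

theorem pvA_eq (src : List Int) (scn : Int) (dst : List Int) (dcn pos : Int) (transp : Bool) :
    translateArray src scn dst dcn pos transp
      = (PySem.List.enumerate src 0).foldl (pvStepA scn dcn pos transp) dst := rfl

theorem pvSet_map_enumerate (dst : List Int) (f : Int × Int → Int) (n : Nat) (x : Int)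
    (hn : n < dst.length) :
    ((PySem.List.enumerate dst 0).map f).set n x
      = (PySem.List.enumerate dst 0).map (fun jv => if jv.1 = (n : Int) then x else f jv) := by
  apply List.ext_getElem
  · simp
  · intro k h1 h2
    simp only [List.getElem_map, PySem.List.getElem_enumerate, List.getElem_set] at *
    rcases eq_or_ne k n with h | h
    · subst h; simp
    · have hne : ¬((0:Int) + (k:Int) = (n:Int)) := by omega
      rw [if_neg hne, if_neg (Ne.symm h)]

theorem pvMain (scn dcn pos : Int) (transp : Bool) (dst : List Int) :
    ∀ src : List Int,
      (∀ k : Nat, k < src.length → (transp = false ∨ src.getD k 0 ≠ 0) →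
        0 ≤ pvNp scn dcn pos (k : Int)) →
      translateArray src scn dst dcn pos transp = pvGather src scn dst dcn pos transp := by
  intro src
  induction src using List.reverseRecOn with
  | nil =>
    intro _
    have hLW : ∀ j d' : Int, pvLatestWrite [] scn dcn pos transp j d' = d' := by
      intro j d'
      rw [pvLW_eq, PySem.List.pyRange_neg_one_eq_nil (by simp [PySem.List.len_eq])]
      rfl
    show dst = _
    simp [pvGather, hLW, PySem.List.map_snd_enumerate]
  | append_singleton xs x ih =>
    intro H
    have Hxs : ∀ k : Nat, k < xs.length → (transp = false ∨ xs.getD k 0 ≠ 0) →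
        0 ≤ pvNp scn dcn pos (k : Int) := by
      intro k hk hw
      apply H k (by simp; omega)
      rcases hw with h | h
      · exact Or.inl h
      · refine Or.inr ?_
        rwa [List.getD, List.getElem?_append_left hk]
    have ihv := ih Hxs
    set np := pos + PySem.Int.mod (xs.length : Int) scn + PySem.Int.floordiv (xs.length : Int) scn * dcn with hnp
    have hA : translateArray (xs ++ [x]) scn dst dcn pos transp
        = pvStepA scn dcn pos transp (translateArray xs scn dst dcn pos transp) ((xs.length : Int), x) := by
      rw [pvA_eq, pvA_eq, PySem.List.enumerate_append]
      simp [PySem.List.enumerate_cons, PySem.List.enumerate_nil, List.foldl_append]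
    have hB : pvGather (xs ++ [x]) scn dst dcn pos transp
        = (PySem.List.enumerate dst 0).map (fun jv =>
            if transp = true ∧ x = 0 then pvLatestWrite xs scn dcn pos transp jv.1 jv.2
            else if np = jv.1 then x
            else pvLatestWrite xs scn dcn pos transp jv.1 jv.2) := by
      unfold pvGather
      exact List.map_congr_left (fun jv _ => pvLW_append xs x scn dcn pos transp jv.1 jv.2)
    rw [hA, hB, ihv]
    by_cases h1 : transp = true ∧ x = 0
    · simp only [if_pos h1]
      have : pvStepA scn dcn pos transp (pvGather xs scn dst dcn pos transp) ((xs.length : Int), x)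
          = pvGather xs scn dst dcn pos transp := by
        obtain ⟨ht, hx0⟩ := h1
        simp [pvStepA, ht, hx0]
      rw [this]; rfl
    · simp only [if_neg h1]
      have hw : transp = false ∨ (xs ++ [x]).getD xs.length 0 ≠ 0 := by
        rcases Bool.eq_false_or_eq_true transp with ht | ht
        · refine Or.inr ?_
          have hx : x ≠ 0 := fun hx0 => h1 ⟨ht, hx0⟩
          simpa [List.getD] using hx
        · exact Or.inl ht
      have hnp0 : 0 ≤ np := by
        have := H xs.length (by simp) hw
        simpa [pvNp, hnp] using this
    -- step on the alt array
      have hlen : (pvGather xs scn dst dcn pos transp).length = dst.length := by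
        simp [pvGather]
      have hstep : pvStepA scn dcn pos transp (pvGather xs scn dst dcn pos transp) ((xs.length : Int), x)
          = if np < (dst.length : Int) then
              PySem.List.pySetD (pvGather xs scn dst dcn pos transp) np x
            else pvGather xs scn dst dcn pos transp := by
        rcases Bool.eq_false_or_eq_true transp with ht | ht
        · have hx : x ≠ 0 := fun hx0 => h1 ⟨ht, hx0⟩
          rw [ht] at hlen ⊢
          simp [pvStepA, hx, hlen, hnp]
        · rw [ht] at hlen ⊢
          simp [pvStepA, hlen, hnp]
      rw [hstep]
      by_cases h2 : np < (dst.length : Int)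
      · rw [if_pos h2, PySem.List.pySetD_of_nonneg _ x hnp0]
        unfold pvGather
        rw [pvSet_map_enumerate dst _ np.toNat x (by omega)]
        apply List.map_congr_left
        intro jv _
        rw [Int.toNat_of_nonneg hnp0]
        exact if_congr eq_comm rfl rfl
      · rw [if_neg h2]
        unfold pvGather
        apply (List.map_congr_left ?_).symm
        intro jv hjv
        obtain ⟨k, hk, rfl⟩ := (PySem.List.mem_enumerate_iff _ _ _).1 hjv
        have : ¬(np = 0 + (k : Int)) := by omega
        rw [if_neg this]

def pvStepD (src : List Int) (scn dcn pos : Int) (transp : Bool) (n : Int)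
    (ov : PySem.Dict Int Int) (index : Int) : PySem.Dict Int Int :=
  let element := PySem.List.pyGetD src index 0
  if transp = true ∧ element = 0 then ov
  else
    let j := pos + PySem.Int.mod index scn + PySem.Int.floordiv index scn * dcn
    if 0 ≤ j ∧ j < n ∧ ov.contains j = false then ov.insert j element else ov

theorem pvAlt_eq (src : List Int) (scn : Int) (dst : List Int) (dcn pos : Int) (transp : Bool) :
    translateArray_alt src scn dst dcn pos transp
      = (PySem.List.enumerate dst 0).map (fun jv =>
          (((PySem.List.pyRange (PySem.List.len src - 1) (-1) (-1)).foldl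
            (pvStepD src scn dcn pos transp (PySem.List.len dst)) PySem.Dict.empty)).getD jv.1 jv.2) := rfl

theorem pvDictInv (src : List Int) (scn dcn pos : Int) (transp : Bool) (n : Int) :
    ∀ (L : List Int) (ov : PySem.Dict Int Int) (j : Int), 0 ≤ j → j < n →
      (L.foldl (pvStepD src scn dcn pos transp n) ov).get? j
        = (ov.get? j).or (L.foldl (pvStepB src scn dcn pos transp j) none) := by
  intro L
  induction L with
  | nil => intro ov j _ _; simp
  | cons i L ih =>
    intro ov j hj0 hjn
    rw [List.foldl_cons, List.foldl_cons]
    by_cases c1 : transp = true ∧ PySem.List.pyGetD src i 0 = 0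
    · have hD : pvStepD src scn dcn pos transp n ov i = ov := by simp [pvStepD, c1]
      have hBs : pvStepB src scn dcn pos transp j none i = none := by simp [pvStepB, c1]
      rw [hD, hBs, ih ov j hj0 hjn]
    · set ji := pos + PySem.Int.mod i scn + PySem.Int.floordiv i scn * dcn with hji
      by_cases c2 : ji = j
      · have hBs : pvStepB src scn dcn pos transp j none i = some (PySem.List.pyGetD src i 0) := by
          simp [pvStepB, c1, ← hji, c2]
        rw [hBs, pvFold_some _ (fun e y => rfl)]
        by_cases c3 : ov.contains j = false
        · have hD : pvStepD src scn dcn pos transp n ov i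
              = ov.insert j (PySem.List.pyGetD src i 0) := by
            simp [pvStepD, c1, ← hji, c2, hj0, hjn, c3]
          rw [hD, ih _ j hj0 hjn]
          have hovj : ov.get? j = none := by
            rw [← Option.not_isSome_iff_eq_none, ← PySem.Dict.contains_eq_isSome_get?]
            simp [c3]
          rw [PySem.Dict.get?_insert_self, hovj]
          simp
        · have hc : ov.contains j = true := by
            cases h : ov.contains j with
            | false => exact absurd h c3
            | true => rfl
          have hD : pvStepD src scn dcn pos transp n ov i = ov := by
            simp [pvStepD, c1, ← hji, c2, hc]
          obtain ⟨s, hs⟩ : ∃ s, ov.get? j = some s := by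
            have := PySem.Dict.contains_eq_isSome_get? (d := ov) (k := j)
            rw [hc] at this
            exact Option.isSome_iff_exists.mp this.symm
          rw [hD, ih ov j hj0 hjn, hs]
          simp
      · have hBs : pvStepB src scn dcn pos transp j none i = none := by
          simp [pvStepB, c1, ← hji, c2]
        have hD : (pvStepD src scn dcn pos transp n ov i).get? j = ov.get? j := by
          unfold pvStepD
          rw [if_neg c1, ← hji]
          by_cases c4 : 0 ≤ ji ∧ ji < n ∧ ov.contains ji = false
          · rw [if_pos c4, PySem.Dict.get?_insert_of_ne _ _ (Ne.symm c2)]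
          · rw [if_neg c4]
        rw [hBs, ih _ j hj0 hjn, hD]

theorem pvAltGather (src : List Int) (scn : Int) (dst : List Int) (dcn pos : Int) (transp : Bool) :
    translateArray_alt src scn dst dcn pos transp
      = (PySem.List.enumerate dst 0).map (fun jv =>
          pvLatestWrite src scn dcn pos transp jv.1 jv.2) := by
  rw [pvAlt_eq]
  apply List.map_congr_left
  intro jv hjv
  obtain ⟨k, hk, rfl⟩ := (PySem.List.mem_enumerate_iff _ _ _).1 hjv
  have h0 : (0:Int) ≤ 0 + (k : Int) := by omega
  have hn : (0:Int) + (k : Int) < PySem.List.len dst := by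
    simp only [PySem.List.len_eq]; omega
  rw [PySem.Dict.getD_eq_get?_getD,
    pvDictInv src scn dcn pos transp (PySem.List.len dst) _ PySem.Dict.empty _ h0 hn,
    PySem.Dict.get?_empty, pvLW_eq]
  simp [Option.or]

-- ===== VERDICT (by name: the statement is the Claim_ definition above) =====
theorem translateArray_spec : Claim_unchanged_translateArray := by
  intro src scn dst dcn pos transp _ hPre hnD
  rw [pvAltGather]
  apply pvMain
  intro k hk hw
  rcases hPre with ⟨hscn, hPre⟩
  have h1 := hPre k hk hw
  by_contra hneg
  exact hnD ⟨k, hk, hw, h1, by omega⟩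

theorem translateArray_changed : Claim_changed_translateArray := by
  unfold Claim_changed_translateArray; decide
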